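-- pv_equiv track=rewrite | github.com/natsuyasai/lazygitlab | lazygitlab/tui/widgets/_diff_parser.py | _apply_context_filter
-- ===== SOURCE A (Python) =====
-- def _apply_context_filter(
--     parsed: list[tuple[str, int | None, int | None, str]],
--     context: int,
--     forced_ctx_indices: set[int] | None = None,
-- ) -> list[tuple[str, int | None, int | None, str]]:
--     """コンテキスト行を ±context 行に制限し、隠れた行を "gap" エントリに置換する。
--
--     gap エントリのフォーマット: ("gap", gap_start_idx, gap_end_idx, text)
--     gap_start_idx / gap_end_idx は parsed リスト内のインデックス。
--     forced_ctx_indices に含まれるインデックスの ctx 行は強制的に表示する。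
--     """
--     forced = forced_ctx_indices or set()
--     changes = {i for i, (t, *_) in enumerate(parsed) if t in ("add", "rem")}
--
--     def _keep(i: int, t: str) -> bool:
--         if t != "ctx":
--             return True
--         return any(abs(i - c) <= context for c in changes) or i in forced
--
--     result: list[tuple[str, int | None, int | None, str]] = []
--     i = 0
--     while i < len(parsed):
--         t = parsed[i][0]
--         if not _keep(i, t):
--             gap_start = i
--             gap = 0
--             while i < len(parsed) and not _keep(i, parsed[i][0]):
--                 gap += 1
--                 i += 1
--             gap_end = i - 1
--             result.append(("gap", gap_start, gap_end, f"··· {gap} lines hidden ···"))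
--         else:
--             result.append(parsed[i])
--             i += 1
--     return result
-- ===== SOURCE B (Python) =====
-- def _apply_context_filter(
--     parsed,
--     context,
--     forced_ctx_indices=None,
-- ):
--     """Difference-array marking of the +/-context
--     ranges around changed lines, then a single sweep with a pending gap."""
--     forced = forced_ctx_indices or set()
--     n = len(parsed)
--     diff = [0] * (n + 1)
--     for i, (t, *_) in enumerate(parsed):
--         if t in ("add", "rem"):
--             lo = max(0, i - context)
--             hi = min(n - 1, i + context)
--             if lo <= hi:
--                 diff[lo] += 1
--                 diff[hi + 1] -= 1
--     keep = [False] * n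
--     cur = 0
--     for i, (t, *_) in enumerate(parsed):
--         cur += diff[i]
--         keep[i] = t != "ctx" or cur > 0 or i in forced
--     result = []
--     gap_start = None
--     for i, item in enumerate(parsed):
--         if keep[i]:
--             if gap_start is not None:
--                 result.append(("gap", gap_start, i - 1, f"··· {i - gap_start} lines hidden ···"))
--                 gap_start = None
--             result.append(item)
--         else:
--             if gap_start is None:
--                 gap_start = i
--     if gap_start is not None:
--         result.append(("gap", gap_start, n - 1, f"··· {n - gap_start} lines hidden ···"))
--     return result
-- ===== Notes on version B (the rewrite author's own statement) =====
-- stated objective: alternative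
-- what changed: A decides each ctx line by scanning the whole change set (any(abs(i-c)<=context ...)) inside nested while loops; B marks each change's clamped +/-context interval in a difference array, derives the keep flags from one running prefix sum, and emits kept lines and gap markers in a single for-loop with a pending gap start.
import Mathlib
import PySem

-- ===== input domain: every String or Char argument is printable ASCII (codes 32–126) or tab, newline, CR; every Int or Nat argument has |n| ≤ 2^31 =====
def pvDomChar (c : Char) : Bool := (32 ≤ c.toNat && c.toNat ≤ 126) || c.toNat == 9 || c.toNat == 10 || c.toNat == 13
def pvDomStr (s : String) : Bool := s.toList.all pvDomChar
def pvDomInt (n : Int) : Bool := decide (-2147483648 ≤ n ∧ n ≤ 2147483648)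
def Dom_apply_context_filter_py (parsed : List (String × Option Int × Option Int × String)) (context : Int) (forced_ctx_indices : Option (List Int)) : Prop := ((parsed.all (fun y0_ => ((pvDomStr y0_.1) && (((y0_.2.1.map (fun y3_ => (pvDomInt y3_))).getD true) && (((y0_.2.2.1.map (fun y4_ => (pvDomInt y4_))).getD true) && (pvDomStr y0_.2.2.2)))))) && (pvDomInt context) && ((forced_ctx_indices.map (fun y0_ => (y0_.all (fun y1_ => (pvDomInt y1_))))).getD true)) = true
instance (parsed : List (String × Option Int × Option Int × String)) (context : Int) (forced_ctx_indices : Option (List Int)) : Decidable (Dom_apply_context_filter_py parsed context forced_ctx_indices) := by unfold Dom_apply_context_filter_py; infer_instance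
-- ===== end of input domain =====

-- B replaces A's per-ctx-line scan over the change set inside nested while loops by a
-- difference-array marking of the ±context ranges, a prefix-sum pass deriving the keep
-- flags, and a single sweep with a pending gap start (alternative algorithm, same values).

-- ===== PORT A =====
-- changes = {i for i, (t, *_) in enumerate(parsed) if t in ("add", "rem")}
def pvChangesA (parsed : List (String × Option Int × Option Int × String)) : List Int :=
  PySem.Set.ofList ((PySem.List.enumerate parsed).filterMap
    (fun p => if p.2.1 = "add" ∨ p.2.1 = "rem" then some p.1 else none))

-- def _keep(i, t)
def pvKeepA (changes forced : List Int) (context : Int) (i : Int) (t : String) : Bool :=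
  if t ≠ "ctx" then true
  else changes.any (fun c => decide (|i - c| ≤ context)) || forced.contains i

-- inner while: 'while i < len(parsed) and not _keep(i, parsed[i][0]): gap += 1; i += 1'
-- (fuel-based structural recursion; fuel = parsed.length - i never runs out mid-loop)
def pvSkipA (parsed : List (String × Option Int × Option Int × String)) (keepAt : Nat → Bool) :
    Nat → Nat → Nat → Nat × Nat
  | 0, i, gap => (i, gap)
  | fuel + 1, i, gap =>
    if i < parsed.length ∧ keepAt i = false then pvSkipA parsed keepAt fuel (i + 1) (gap + 1)
    else (i, gap)

-- outer while loop of A (fuel = parsed.length - i suffices: i advances every iteration)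
def pvLoopA (parsed : List (String × Option Int × Option Int × String)) (keepAt : Nat → Bool) :
    Nat → Nat → List (String × Option Int × Option Int × String)
  | 0, _ => []
  | fuel + 1, i =>
    if i < parsed.length then
      if keepAt i = false then
        let r := pvSkipA parsed keepAt (parsed.length - i) i 0
        ("gap", some (i : Int), some ((r.1 : Int) - 1),
          "··· " ++ PySem.Int.toStr (r.2 : Int) ++ " lines hidden ···") :: pvLoopA parsed keepAt fuel r.1
      else parsed.getD i ("", none, none, "") :: pvLoopA parsed keepAt fuel (i + 1)
    else []

def apply_context_filter_py (parsed : List (String × Option Int × Option Int × String)) (context : Int) (forced_ctx_indices : Option (List Int)) : List (String × Option Int × Option Int × String) :=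
  let forced : List Int := forced_ctx_indices.getD []
  let changes := pvChangesA parsed
  pvLoopA parsed
    (fun i => pvKeepA changes forced context (i : Int) ((parsed.getD i ("", none, none, "")).1))
    parsed.length 0

-- ===== PORT B =====
-- difference array: diff[lo] += 1; diff[hi+1] -= 1 around each change
def pvDiffB (parsed : List (String × Option Int × Option Int × String)) (context : Int) : List Int :=
  (PySem.List.enumerate parsed).foldl (fun diff p =>
    if p.2.1 = "add" ∨ p.2.1 = "rem" then
      let lo := max 0 (p.1 - context)
      let hi := min ((parsed.length : Int) - 1) (p.1 + context)
      if lo ≤ hi then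
        let d1 := diff.set lo.toNat (diff.getD lo.toNat 0 + 1)
        d1.set (hi + 1).toNat (d1.getD (hi + 1).toNat 0 - 1)
      else diff
    else diff) (List.replicate (parsed.length + 1) 0)

-- running prefix sum: keep.append(t != "ctx" or cur > 0 or i in forced)
def pvKeepB (parsed : List (String × Option Int × Option Int × String)) (diff forced : List Int) : List Bool :=
  ((PySem.List.enumerate parsed).foldl (fun s p =>
      let cur := s.1 + PySem.List.pyGetD diff p.1 0
      (cur, s.2 ++ [decide (p.2.1 ≠ "ctx") || decide (0 < cur) || forced.contains p.1]))
    ((0 : Int), ([] : List Bool))).2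

def pvGapB (g e cnt : Int) : String × Option Int × Option Int × String :=
  ("gap", some g, some e, "··· " ++ PySem.Int.toStr cnt ++ " lines hidden ···")

def pvFlush (n : Nat) (st : List (String × Option Int × Option Int × String) × Option Int) :
    List (String × Option Int × Option Int × String) :=
  match st.2 with
  | some g => st.1 ++ [pvGapB g ((n : Int) - 1) ((n : Int) - g)]
  | none => st.1

-- single sweep with a pending gap start
def pvSweepB (parsed : List (String × Option Int × Option Int × String)) (keep : List Bool) :
    List (String × Option Int × Option Int × String) :=
  pvFlush parsed.length
    ((PySem.List.enumerate parsed).foldl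
      (fun (s : List (String × Option Int × Option Int × String) × Option Int) p =>
        if PySem.List.pyGetD keep p.1 false then
          match s.2 with
          | some g => (s.1 ++ [pvGapB g (p.1 - 1) (p.1 - g), p.2], none)
          | none => (s.1 ++ [p.2], none)
        else
          match s.2 with
          | some _ => s
          | none => (s.1, some p.1))
      (([] : List (String × Option Int × Option Int × String)), (none : Option Int)))

def apply_context_filter_py_alt (parsed : List (String × Option Int × Option Int × String)) (context : Int) (forced_ctx_indices : Option (List Int)) : List (String × Option Int × Option Int × String) :=
  let forced : List Int := forced_ctx_indices.getD []
  let diff := pvDiffB parsed context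
  pvSweepB parsed (pvKeepB parsed diff forced)

-- ===== PRECONDITION & SPEC =====
def Spec_apply_context_filter_py (parsed : List (String × Option Int × Option Int × String)) (context : Int) (forced_ctx_indices : Option (List Int)) (out : List (String × Option Int × Option Int × String)) : Prop := out = apply_context_filter_py_alt parsed context forced_ctx_indices
instance (parsed : List (String × Option Int × Option Int × String)) (context : Int) (forced_ctx_indices : Option (List Int)) (out : List (String × Option Int × Option Int × String)) : Decidable (Spec_apply_context_filter_py parsed context forced_ctx_indices out) := by unfold Spec_apply_context_filter_py; infer_instance

-- ===== CLAIM (what is proved, stated in full; the proofs are below) =====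
def Claim_equal_apply_context_filter_py : Prop := ∀ (parsed : List (String × Option Int × Option Int × String)) (context : Int) (forced_ctx_indices : Option (List Int)), Dom_apply_context_filter_py parsed context forced_ctx_indices → Spec_apply_context_filter_py parsed context forced_ctx_indices (apply_context_filter_py parsed context forced_ctx_indices)

-- ===== LEMMAS AND PROOFS =====

-- A's keep test, at index i, looking the line type up in parsed (the function A's port loops with)
def pvKbA (parsed : List (String × Option Int × Option Int × String)) (context : Int)
    (forced : List Int) (i : Nat) : Bool :=
  pvKeepA (pvChangesA parsed) forced context (i : Int) ((parsed.getD i ("", none, none, "")).1)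

-- prefix sum of the first k cells of the difference array
def pvPsum (l : List Int) (k : Nat) : Int := ∑ j ∈ Finset.range k, l.getD j 0

lemma pvGetD_set (l : List Int) (p : Nat) (v : Int) (j : Nat) (hp : p < l.length) :
    (l.set p v).getD j 0 = if j = p then v else l.getD j 0 := by
  by_cases hj : j = p
  · subst hj; simp [List.getD_eq_getElem?_getD, hp]
  · simp [List.getD_eq_getElem?_getD, List.getElem?_set_ne (by omega : p ≠ j), hj]

lemma pvPsum_set (l : List Int) (p : Nat) (d : Int) (hp : p < l.length) (k : Nat) :
    pvPsum (l.set p (l.getD p 0 + d)) k = pvPsum l k + (if p < k then d else 0) := by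
  unfold pvPsum
  rw [Finset.sum_congr rfl (fun j _ => pvGetD_set l p (l.getD p 0 + d) j hp)]
  have : ∀ j ∈ Finset.range k,
      (if j = p then l.getD p 0 + d else l.getD j 0) = l.getD j 0 + (if j = p then d else 0) := by
    intro j _; by_cases hj : j = p <;> simp [hj]
  rw [Finset.sum_congr rfl this, Finset.sum_add_distrib, Finset.sum_ite_eq' (Finset.range k) p]
  simp [Finset.mem_range]

-- the net effect of one change entry on the prefix sums of the difference array
lemma pvDiff_step (n : Nat) (context : Int) (l : List Int) (c : Int)
    (hl : l.length = n + 1) (hc : 0 ≤ c ∧ c < (n : Int)) (i : Nat) (hi : i < n) :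
    pvPsum
      (if max 0 (c - context) ≤ min ((n : Int) - 1) (c + context) then
        (l.set (max 0 (c - context)).toNat
            (l.getD (max 0 (c - context)).toNat 0 + 1)).set
          (min ((n : Int) - 1) (c + context) + 1).toNat
          ((l.set (max 0 (c - context)).toNat
              (l.getD (max 0 (c - context)).toNat 0 + 1)).getD
            (min ((n : Int) - 1) (c + context) + 1).toNat 0 - 1)
      else l) (i + 1)
    = pvPsum l (i + 1) + (if |(i : Int) - c| ≤ context then 1 else 0) := by
  set lo : Int := max 0 (c - context) with hlo
  set hi' : Int := min ((n : Int) - 1) (c + context) with hhi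
  have hlo0 : 0 ≤ lo := le_max_left _ _
  by_cases hle : lo ≤ hi'
  · have hloN : lo.toNat < l.length := by
      have h1 : lo ≤ (n : Int) - 1 := le_trans hle (min_le_left _ _)
      omega
    have hhiN : (hi' + 1).toNat < l.length := by
      have h1 : hi' ≤ (n : Int) - 1 := min_le_left _ _
      omega
    rw [if_pos hle]
    have e2 : ((l.set lo.toNat (l.getD lo.toNat 0 + 1)).getD (hi' + 1).toNat 0 - 1)
        = ((l.set lo.toNat (l.getD lo.toNat 0 + 1)).getD (hi' + 1).toNat 0 + (-1)) := by ring
    rw [e2, pvPsum_set _ _ _ (by simpa using hhiN), pvPsum_set _ _ _ hloN]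
    have hlo_iff : (lo.toNat < i + 1) ↔ (lo ≤ (i : Int)) := by omega
    have hhi_iff : ((hi' + 1).toNat < i + 1) ↔ (hi' + 1 ≤ (i : Int)) := by
      have : 0 ≤ hi' := le_trans hlo0 hle
      omega
    have hcov : (|(i : Int) - c| ≤ context) ↔ (lo ≤ (i : Int) ∧ (i : Int) ≤ hi') := by
      rw [hlo, hhi, abs_le, max_le_iff, le_min_iff]
      constructor
      · intro h; refine ⟨⟨by omega, by omega⟩, by omega, by omega⟩
      · intro h; omega
    by_cases h1 : lo ≤ (i : Int) <;> by_cases h2 : (i : Int) ≤ hi'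
    · rw [if_pos (hlo_iff.mpr h1), if_neg (by rw [hhi_iff]; omega), if_pos (hcov.mpr ⟨h1, h2⟩)]; ring
    · rw [if_pos (hlo_iff.mpr h1), if_pos (by rw [hhi_iff]; omega), if_neg (by rw [hcov]; omega)]; ring
    · rw [if_neg (by rw [hlo_iff]; omega), if_neg (by rw [hhi_iff]; omega), if_neg (by rw [hcov]; omega)]; ring
    · rw [if_neg (by rw [hlo_iff]; omega), if_neg (by rw [hhi_iff]; omega), if_neg (by rw [hcov]; omega)]; ring
  · rw [if_neg hle]
    have : ¬ |(i : Int) - c| ≤ context := by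
      intro hab
      rw [abs_le] at hab
      apply hle
      rw [hlo, hhi, le_min_iff]
      constructor <;> rw [max_le_iff] <;> constructor <;> omega
    rw [if_neg this]; ring

-- invariant of B's difference-array building fold
lemma pvDiff_inv (n : Nat) (context : Int) :
    ∀ (es : List (Int × (String × Option Int × Option Int × String))) (l : List Int),
    l.length = n + 1 → (∀ p ∈ es, 0 ≤ p.1 ∧ p.1 < (n : Int)) → ∀ i : Nat, i < n →
    pvPsum (es.foldl (fun diff p =>
      if p.2.1 = "add" ∨ p.2.1 = "rem" then
        let lo := max 0 (p.1 - context)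
        let hi := min ((n : Int) - 1) (p.1 + context)
        if lo ≤ hi then
          let d1 := diff.set lo.toNat (diff.getD lo.toNat 0 + 1)
          d1.set (hi + 1).toNat (d1.getD (hi + 1).toNat 0 - 1)
        else diff
      else diff) l) (i + 1)
    = pvPsum l (i + 1)
      + ((es.countP (fun p => decide (p.2.1 = "add" ∨ p.2.1 = "rem")
          && decide (|(i : Int) - p.1| ≤ context))) : Int) := by
  intro es
  induction es with
  | nil => intro l _ _ i _; simp
  | cons p es ih =>
    intro l hl hb i hi
    rw [List.foldl_cons, List.countP_cons]
    by_cases hchg : p.2.1 = "add" ∨ p.2.1 = "rem"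
    · rw [if_pos hchg]
      have hstep := pvDiff_step n context l p.1 hl (hb p (by simp)) i hi
      by_cases hle : max 0 (p.1 - context) ≤ min ((n : Int) - 1) (p.1 + context)
      · rw [if_pos hle] at hstep ⊢
        rw [ih _ (by simp [hl]) (fun q hq => hb q (by simp [hq])) i hi, hstep]
        by_cases hcov : |(i : Int) - p.1| ≤ context <;> simp [hchg, hcov] <;> push_cast <;> omega
      · rw [if_neg hle] at hstep ⊢
        rw [ih _ hl (fun q hq => hb q (by simp [hq])) i hi, hstep]
        by_cases hcov : |(i : Int) - p.1| ≤ context <;> simp [hchg, hcov] <;> push_cast <;> omega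
    · rw [if_neg hchg]
      rw [ih _ hl (fun q hq => hb q (by simp [hq])) i hi]
      simp [hchg]

-- the prefix sum over B's finished difference array counts the changes covering i
lemma pvDiffB_psum (parsed : List (String × Option Int × Option Int × String)) (context : Int)
    (i : Nat) (hi : i < parsed.length) :
    pvPsum (pvDiffB parsed context) (i + 1)
    = (((PySem.List.enumerate parsed 0).countP (fun p => decide (p.2.1 = "add" ∨ p.2.1 = "rem")
        && decide (|(i : Int) - p.1| ≤ context))) : Int) := by
  have hb : ∀ p ∈ PySem.List.enumerate parsed 0, 0 ≤ p.1 ∧ p.1 < (parsed.length : Int) := by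
    intro p hp
    rw [PySem.List.mem_enumerate_iff] at hp
    obtain ⟨k, hk, rfl⟩ := hp
    constructor <;> simp <;> omega
  have h0 : pvPsum (List.replicate (parsed.length + 1) (0 : Int)) (i + 1) = 0 := by
    unfold pvPsum
    apply Finset.sum_eq_zero
    intro j hj
    rw [Finset.mem_range] at hj
    have hjn : j < parsed.length + 1 := by omega
    simp [List.getD_eq_getElem?_getD, hjn]
  have := pvDiff_inv parsed.length context (PySem.List.enumerate parsed 0)
    (List.replicate (parsed.length + 1) 0) (by simp) hb i hi
  unfold pvDiffB
  rw [this, h0, zero_add]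

-- both "is some change within ±context" tests decide the same proposition
lemma pvCov_iff (parsed : List (String × Option Int × Option Int × String)) (context : Int)
    (i : Nat) :
    ((pvChangesA parsed).any (fun c => decide (|(i : Int) - c| ≤ context)) = true)
    ↔ (0 < (PySem.List.enumerate parsed 0).countP (fun p => decide (p.2.1 = "add" ∨ p.2.1 = "rem")
        && decide (|(i : Int) - p.1| ≤ context))) := by
  rw [List.any_eq_true, List.countP_pos_iff]
  unfold pvChangesA
  constructor
  · rintro ⟨c, hc, hcb⟩
    rw [PySem.Set.mem_ofList, List.mem_filterMap] at hc
    obtain ⟨p, hp, hpc⟩ := hc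
    by_cases hchg : p.2.1 = "add" ∨ p.2.1 = "rem"
    · rw [if_pos hchg] at hpc
      refine ⟨p, hp, ?_⟩
      cases hpc
      simp only [Bool.and_eq_true, decide_eq_true_eq] at hcb ⊢
      exact ⟨hchg, hcb⟩
    · rw [if_neg hchg] at hpc; cases hpc
  · rintro ⟨p, hp, hpb⟩
    simp only [Bool.and_eq_true, decide_eq_true_eq] at hpb
    refine ⟨p.1, ?_, by simp [hpb.2]⟩
    rw [PySem.Set.mem_ofList, List.mem_filterMap]
    exact ⟨p, hp, by rw [if_pos hpb.1]⟩

-- the boolean B appends at index i equals A's keep test there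
lemma pvKeepBool_eq (parsed : List (String × Option Int × Option Int × String)) (context : Int)
    (forced : List Int) (i : Nat) (hi : i < parsed.length) :
    (decide ((parsed.getD i ("", none, none, "")).1 ≠ "ctx")
      || decide (0 < pvPsum (pvDiffB parsed context) (i + 1))
      || forced.contains (i : Int))
    = pvKbA parsed context forced i := by
  unfold pvKbA pvKeepA
  by_cases ht : (parsed.getD i ("", none, none, "")).1 = "ctx"
  all_goals rw [List.getD_eq_getElem?_getD] at ht
  · rw [if_neg (by simp [ht])]
    have : decide ((parsed.getD i ("", none, none, "")).1 ≠ "ctx") = false := by simp [ht]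
    rw [this, Bool.false_or]
    congr 1
    have hcnt := pvDiffB_psum parsed context i hi
    have hcov := pvCov_iff parsed context i
    by_cases hany : (pvChangesA parsed).any (fun c => decide (|(i : Int) - c| ≤ context)) = true
    · rw [hany]
      rw [hcov] at hany
      simp only [decide_eq_true_eq]
      rw [hcnt]
      exact_mod_cast hany
    · rw [Bool.not_eq_true] at hany
      rw [hany]
      simp only [decide_eq_false_iff_not]
      rw [hcnt]
      intro hpos
      have hx : (pvChangesA parsed).any (fun c => decide (|(i : Int) - c| ≤ context)) = true :=
        hcov.mpr (by exact_mod_cast hpos)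
      rw [hx] at hany
      simp at hany
  · rw [if_pos (by simp [ht])]
    simp [ht]

-- B's keep list is A's keep test mapped over all indices
lemma pvKeepB_eq_map (parsed : List (String × Option Int × Option Int × String)) (context : Int)
    (forced : List Int) :
    pvKeepB parsed (pvDiffB parsed context) forced
    = (List.range parsed.length).map (pvKbA parsed context forced) := by
  have main : ∀ (m i : Nat) (acc : List Bool), parsed.length - i ≤ m → i ≤ parsed.length →
      ((PySem.List.enumerate (parsed.drop i) (i : Int)).foldl (fun s p =>
          let cur := s.1 + PySem.List.pyGetD (pvDiffB parsed context) p.1 0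
          (cur, s.2 ++ [decide (p.2.1 ≠ "ctx") || decide (0 < cur) || forced.contains p.1]))
        (pvPsum (pvDiffB parsed context) i, acc)).2
      = acc ++ (List.range' i (parsed.length - i)).map (pvKbA parsed context forced) := by
    intro m
    induction m with
    | zero =>
      intro i acc hm hle
      have : i = parsed.length := by omega
      subst this
      simp [List.drop_of_length_le (le_refl _), PySem.List.enumerate_nil]
    | succ m ih =>
      intro i acc hm hle
      by_cases hi : i < parsed.length
      · rw [List.drop_eq_getElem_cons hi, PySem.List.enumerate_cons]
        rw [List.foldl_cons]
        simp only
        have hget : PySem.List.pyGetD (pvDiffB parsed context) (i : Int) 0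
            = (pvDiffB parsed context).getD i 0 := by
          rw [PySem.List.pyGetD_natCast]
        have hcur : pvPsum (pvDiffB parsed context) i + (pvDiffB parsed context).getD i 0
            = pvPsum (pvDiffB parsed context) (i + 1) := by
          unfold pvPsum
          rw [Finset.sum_range_succ]
        have hb : (decide ((parsed[i]).1 ≠ "ctx")
              || decide (0 < pvPsum (pvDiffB parsed context) (i + 1))
              || forced.contains (i : Int)) = pvKbA parsed context forced i := by
          have := pvKeepBool_eq parsed context forced i hi
          rwa [List.getD_eq_getElem _ _ hi] at this
        rw [hget, hcur, hb]
        have hcast : ((i : Int) + 1) = (((i + 1 : Nat)) : Int) := by push_cast; ring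
        rw [hcast]
        rw [ih (i + 1) (acc ++ [pvKbA parsed context forced i]) (by omega) (by omega)]
        have hrange : List.range' i (parsed.length - i)
            = i :: List.range' (i + 1) (parsed.length - (i + 1)) := by
          have : parsed.length - i = (parsed.length - (i + 1)) + 1 := by omega
          rw [this, List.range'_succ]
        rw [hrange]
        simp
      · have : i = parsed.length := by omega
        subst this
        simp [List.drop_of_length_le (le_refl _), PySem.List.enumerate_nil]
  have h0 := main parsed.length 0 [] (by omega) (by omega)
  have hz : pvPsum (pvDiffB parsed context) 0 = 0 := by simp [pvPsum]
  rw [List.drop_zero, show ((0 : Nat) : Int) = (0 : Int) by rfl, hz] at h0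
  unfold pvKeepB
  rw [h0]
  simp [List.range_eq_range']

lemma pvSkipA_le (parsed : List (String × Option Int × Option Int × String)) (f : Nat → Bool) :
    ∀ (fuel i gap : Nat), i ≤ (pvSkipA parsed f fuel i gap).1 := by
  intro fuel
  induction fuel with
  | zero => intro i gap; simp [pvSkipA]
  | succ fuel ih =>
    intro i gap
    rw [pvSkipA]
    by_cases hc : i < parsed.length ∧ f i = false
    · rw [if_pos hc]; have := ih (i + 1) (gap + 1); omega
    · rw [if_neg hc]

lemma pvSkipA_shift (parsed : List (String × Option Int × Option Int × String)) (f : Nat → Bool) :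
    ∀ (fuel i g : Nat),
    pvSkipA parsed f fuel i g = ((pvSkipA parsed f fuel i 0).1, g + (pvSkipA parsed f fuel i 0).2) := by
  intro fuel
  induction fuel with
  | zero => intro i g; simp [pvSkipA]
  | succ fuel ih =>
    intro i g
    rw [pvSkipA]
    conv_rhs => rw [pvSkipA]
    by_cases hc : i < parsed.length ∧ f i = false
    · rw [if_pos hc, if_pos hc, ih (i + 1) (g + 1), ih (i + 1) (0 + 1)]
      simp only [Prod.mk.injEq]
      exact ⟨trivial, by omega⟩
    · rw [if_neg hc, if_neg hc]
      simp

lemma pvSkipA_gap (parsed : List (String × Option Int × Option Int × String)) (f : Nat → Bool) :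
    ∀ (fuel i : Nat), (pvSkipA parsed f fuel i 0).2 = (pvSkipA parsed f fuel i 0).1 - i := by
  intro fuel
  induction fuel with
  | zero => intro i; simp [pvSkipA]
  | succ fuel ih =>
    intro i
    rw [pvSkipA]
    by_cases hc : i < parsed.length ∧ f i = false
    · rw [if_pos hc, pvSkipA_shift parsed f fuel (i + 1) (0 + 1)]
      have ht := ih (i + 1)
      have hle := pvSkipA_le parsed f fuel (i + 1) 0
      simp only
      omega
    · rw [if_neg hc]
      simp

lemma pvLoopA_len (parsed : List (String × Option Int × Option Int × String)) (f : Nat → Bool) :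
    ∀ fuel, pvLoopA parsed f fuel parsed.length = [] := by
  intro fuel
  cases fuel with
  | zero => rw [pvLoopA]
  | succ fuel => rw [pvLoopA, if_neg (lt_irrefl _)]

-- the single sweep with a pending gap start reproduces A's nested while loops
lemma pvSweep_main (parsed : List (String × Option Int × Option Int × String))
    (K : List Bool) (f : Nat → Bool)
    (hf : ∀ j, j < parsed.length → PySem.List.pyGetD K (j : Int) false = f j) :
    ∀ (m i : Nat), parsed.length - i ≤ m → i ≤ parsed.length →
    ∀ (res : List (String × Option Int × Option Int × String)),
    (∀ fuel : Nat, parsed.length - i ≤ fuel →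
      pvFlush parsed.length ((PySem.List.enumerate (parsed.drop i) (i : Int)).foldl
        (fun (s : List (String × Option Int × Option Int × String) × Option Int) p =>
          if PySem.List.pyGetD K p.1 false then
            match s.2 with
            | some g => (s.1 ++ [pvGapB g (p.1 - 1) (p.1 - g), p.2], none)
            | none => (s.1 ++ [p.2], none)
          else
            match s.2 with
            | some _ => s
            | none => (s.1, some p.1))
        (res, none))
      = res ++ pvLoopA parsed f fuel i)
    ∧ (∀ (g : Int) (fuel : Nat),
      parsed.length - (pvSkipA parsed f (parsed.length - i) i 0).1 ≤ fuel →
      pvFlush parsed.length ((PySem.List.enumerate (parsed.drop i) (i : Int)).foldl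
        (fun (s : List (String × Option Int × Option Int × String) × Option Int) p =>
          if PySem.List.pyGetD K p.1 false then
            match s.2 with
            | some g => (s.1 ++ [pvGapB g (p.1 - 1) (p.1 - g), p.2], none)
            | none => (s.1 ++ [p.2], none)
          else
            match s.2 with
            | some _ => s
            | none => (s.1, some p.1))
        (res, some g))
      = res ++ pvGapB g (((pvSkipA parsed f (parsed.length - i) i 0).1 : Int) - 1)
            (((pvSkipA parsed f (parsed.length - i) i 0).1 : Int) - g)
          :: pvLoopA parsed f fuel (pvSkipA parsed f (parsed.length - i) i 0).1) := by
  intro m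
  induction m with
  | zero =>
    intro i hm hle res
    have hi : i = parsed.length := by omega
    subst hi
    constructor
    · intro fuel _
      rw [List.drop_of_length_le (le_refl _), PySem.List.enumerate_nil, List.foldl_nil,
        pvLoopA_len]
      simp [pvFlush]
    · intro g fuel _
      rw [List.drop_of_length_le (le_refl _), PySem.List.enumerate_nil, List.foldl_nil,
        Nat.sub_self, pvSkipA]
      rw [pvLoopA_len]
      simp [pvFlush]
  | succ m ih =>
    intro i hm hle res
    by_cases hi : i < parsed.length
    · rw [List.drop_eq_getElem_cons hi, PySem.List.enumerate_cons]
      have hK := hf i hi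
      have hn1 : parsed.length - i = (parsed.length - (i + 1)) + 1 := by omega
      have hcast : ((i : Int) + 1) = (((i + 1 : Nat)) : Int) := by push_cast; ring
      by_cases hfi : f i = true
      · have hskip : pvSkipA parsed f (parsed.length - i) i 0 = (i, 0) := by
          rw [hn1, pvSkipA, if_neg (by rintro ⟨_, h2⟩; rw [hfi] at h2; cases h2)]
        constructor
        · intro fuel hfuel
          rcases fuel with _ | fu
          · omega
          rw [List.foldl_cons]
          simp only [hK, hfi, if_true]
          rw [hcast, (ih (i + 1) (by omega) (by omega) (res ++ [parsed[i]])).1 fu (by omega)]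
          conv_rhs => rw [pvLoopA]
          rw [if_pos hi, if_neg (by simp [hfi]), List.getD_eq_getElem _ _ hi]
          simp
        · intro g fuel hfuel
          rw [hskip] at hfuel ⊢
          simp only at hfuel ⊢
          rcases fuel with _ | fu
          · omega
          rw [List.foldl_cons]
          simp only [hK, hfi, if_true]
          rw [hcast, (ih (i + 1) (by omega) (by omega)
            (res ++ [pvGapB g ((i : Int) - 1) ((i : Int) - g), parsed[i]])).1 fu (by omega)]
          conv_rhs => rw [pvLoopA]
          rw [if_pos hi, if_neg (by simp [hfi]), List.getD_eq_getElem _ _ hi]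
          simp
      · rw [Bool.not_eq_true] at hfi
        have hle' := pvSkipA_le parsed f (parsed.length - (i + 1)) (i + 1) 0
        have ht' := pvSkipA_gap parsed f (parsed.length - (i + 1)) (i + 1)
        have hskip : pvSkipA parsed f (parsed.length - i) i 0
            = ((pvSkipA parsed f (parsed.length - (i + 1)) (i + 1) 0).1,
               0 + 1 + (pvSkipA parsed f (parsed.length - (i + 1)) (i + 1) 0).2) := by
          rw [hn1, pvSkipA, if_pos ⟨hi, hfi⟩,
            pvSkipA_shift parsed f (parsed.length - (i + 1)) (i + 1) (0 + 1)]
        constructor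
        · intro fuel hfuel
          rcases fuel with _ | fu
          · omega
          rw [List.foldl_cons]
          simp only [hK, hfi, Bool.false_eq_true, if_false]
          rw [hcast, (ih (i + 1) (by omega) (by omega) res).2 (i : Int) fu (by omega)]
          conv_rhs => rw [pvLoopA]
          rw [if_pos hi, if_pos hfi]
          simp only [hskip]
          have harg : (((0 + 1 + (pvSkipA parsed f (parsed.length - (i + 1)) (i + 1) 0).2 : Nat)) : Int)
              = (((pvSkipA parsed f (parsed.length - (i + 1)) (i + 1) 0).1 : Int)) - (i : Int) := by
            omega
          simp [pvGapB, harg]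
        · intro g fuel hfuel
          rw [hskip] at hfuel ⊢
          simp only at hfuel ⊢
          rw [List.foldl_cons]
          simp only [hK, hfi, Bool.false_eq_true, if_false]
          rw [hcast, (ih (i + 1) (by omega) (by omega) res).2 g fuel (by omega)]
    · have hieq : i = parsed.length := by omega
      subst hieq
      constructor
      · intro fuel _
        rw [List.drop_of_length_le (le_refl _), PySem.List.enumerate_nil, List.foldl_nil,
          pvLoopA_len]
        simp [pvFlush]
      · intro g fuel _
        rw [List.drop_of_length_le (le_refl _), PySem.List.enumerate_nil, List.foldl_nil,
          Nat.sub_self, pvSkipA]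
        rw [pvLoopA_len]
        simp [pvFlush]

-- ===== VERDICT (by name: the statement is the Claim_ definition above) =====
theorem apply_context_filter_py_spec : Claim_equal_apply_context_filter_py := by
  intro parsed context forced_ctx_indices _
  unfold Spec_apply_context_filter_py apply_context_filter_py apply_context_filter_py_alt pvSweepB
  simp only
  have hf : ∀ j, j < parsed.length →
      PySem.List.pyGetD
        (pvKeepB parsed (pvDiffB parsed context) (forced_ctx_indices.getD [])) (j : Int) false
      = pvKbA parsed context (forced_ctx_indices.getD []) j := by
    intro j hj
    rw [pvKeepB_eq_map, PySem.List.pyGetD_natCast, List.getD_eq_getElem _ _ (by simp [hj])]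
    simp
  have hmain := (pvSweep_main parsed
    (pvKeepB parsed (pvDiffB parsed context) (forced_ctx_indices.getD []))
    (pvKbA parsed context (forced_ctx_indices.getD [])) hf parsed.length 0 (by omega) (by omega) []).1
    parsed.length (by omega)
  rw [List.drop_zero, Nat.cast_zero, List.nil_append] at hmain
  rw [show (fun (i : Nat) => pvKeepA (pvChangesA parsed) (forced_ctx_indices.getD []) context (i : Int)
      ((parsed.getD i ("", none, none, "")).1))
    = pvKbA parsed context (forced_ctx_indices.getD []) from rfl]
  exact hmain.symm
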